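-- pv_equiv track=rewrite | github.com/a1ip/my_check | cargo.py | cargo
-- ===== SOURCE A (Python) =====
-- def cargo(data, half):
--     if sum(data) <= half:
--         return 0
--     result = list()
--     for i in range(len(data)):
--         copy = data.copy()
--         val = copy.pop(i)
--         result.append(val + cargo(copy, half) )
--     return (min(result))
-- ===== SOURCE B (Python) =====
-- def cargo(data, half):
--     # Minimum total weight to remove so that the remaining sum is <= half:
--     # iterative subset-sum DP over the set of achievable removal sums,
--     # instead of A's factorial recursion over removal orders.
--     total = sum(data)
--     if total <= half:
--         return 0
--     sums = {0}
--     for x in data: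
--         sums |= {s + x for s in sums}
--     return min(s for s in sums if total - s <= half)
-- ===== Notes on version B (the rewrite author's own statement) =====
-- stated objective: faster
-- what changed: Replaced A's factorial recursion over all removal orders (re-copying and popping each index) by a one-pass subset-sum dynamic program over the set of achievable removal sums, taking the minimum qualifying sum; intended as faster (asymptotic) — a timing run could not measure a ratio because A timed out at n=16 where B returned.
import Mathlib
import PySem

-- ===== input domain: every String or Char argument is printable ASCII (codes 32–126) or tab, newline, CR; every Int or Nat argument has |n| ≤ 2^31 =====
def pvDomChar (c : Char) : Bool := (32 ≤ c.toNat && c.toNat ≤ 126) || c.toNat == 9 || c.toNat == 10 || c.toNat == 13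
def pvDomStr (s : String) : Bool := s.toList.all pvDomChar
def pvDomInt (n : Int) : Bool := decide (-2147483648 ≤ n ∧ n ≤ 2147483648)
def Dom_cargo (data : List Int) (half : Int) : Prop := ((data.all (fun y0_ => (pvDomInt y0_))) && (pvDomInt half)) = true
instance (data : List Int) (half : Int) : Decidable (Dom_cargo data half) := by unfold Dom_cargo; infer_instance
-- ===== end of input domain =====

-- B replaces A's factorial recursion over removal orders by a subset-sum DP over the set of
-- achievable removal sums; A raises ValueError when half < 0 < sum(data) - half (excluded by Pre_).


-- ===== PORT A =====
-- for i in range(len(data)): copy = data.copy(); val = copy.pop(i) — exact: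
-- PySem.List.pop? data i = some (data[i], data.eraseIdx i) for 0 ≤ i < len (PySem.List.pop?_natCast).
-- min(result) raises ValueError on [], excluded by Pre_cargo (→ .getD 0 is never the default there).
def cargo (data : List Int) (half : Int) : Int :=
  if data.sum ≤ half then 0
  else
    (PySem.List.min?
      ((List.range data.length).attach.map
        (fun ⟨i, hi⟩ => data[i]'(List.mem_range.mp hi) + cargo (data.eraseIdx i) half))
      (fun x => x)).getD 0
termination_by data.length
decreasing_by
  have h := List.mem_range.mp hi
  simp [List.length_eraseIdx, h]
  omega

-- ===== PORT B =====
-- sums = {0}; for x in data: sums |= {s + x for s in sums}; min over the filtered set —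
-- min without key is order-independent, so consuming the Set's elements here is exact.
def cargo_alt (data : List Int) (half : Int) : Int :=
  let total := data.sum
  if total ≤ half then 0
  else
    let sums : PySem.Set Int :=
      data.foldl (fun acc x => PySem.Set.union acc (acc.map (fun s => s + x))) (PySem.Set.ofList [0])
    ((PySem.List.min? (sums.filter (fun s => decide (total - s ≤ half))) (fun x => x)).getD 0)

-- ===== PRECONDITION & SPEC =====
-- A raises ValueError (min of the empty candidate list after the list is exhausted) exactly when
-- half < 0 and sum(data) > half; Pre_ excludes precisely those inputs.
def Pre_cargo (data : List Int) (half : Int) : Prop := data.sum ≤ half ∨ 0 ≤ half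
instance (data : List Int) (half : Int) : Decidable (Pre_cargo data half) := by
  unfold Pre_cargo; infer_instance

def pvWitness_cargo : List Int × Int := ([3, 1, 4, 2], 5)

def Spec_cargo (data : List Int) (half : Int) (out : Int) : Prop := out = cargo_alt data half
instance (data : List Int) (half : Int) (out : Int) : Decidable (Spec_cargo data half out) := by
  unfold Spec_cargo; infer_instance

-- ===== CLAIM (what is proved, stated in full; the proofs are below) =====
def Claim_equal_cargo : Prop := ∀ (data : List Int) (half : Int),
  Dom_cargo data half → Pre_cargo data half → Spec_cargo data half (cargo data half)

-- ===== LEMMAS AND PROOFS =====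

lemma cargo_of_le {data : List Int} {half : Int} (h : data.sum ≤ half) : cargo data half = 0 := by
  rw [cargo]; simp [h]

lemma cargo_of_gt {data : List Int} {half : Int} (h : ¬ data.sum ≤ half) :
    cargo data half =
      (PySem.List.min?
        ((List.range data.length).attach.map
          (fun ⟨i, hi⟩ => data[i]'(List.mem_range.mp hi) + cargo (data.eraseIdx i) half))
        (fun x => x)).getD 0 := by
  rw [cargo]; simp [h]

-- S ≤ x ::ₘ M iff S avoids x's extra copy or contains it
lemma le_cons_iff_aux {x : Int} {S M : Multiset Int} :
    S ≤ x ::ₘ M ↔ S ≤ M ∨ ∃ S', S' ≤ M ∧ S = x ::ₘ S' := by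
  constructor
  · intro h
    by_cases hx : x ∈ S
    · right
      refine ⟨S.erase x, ?_, (Multiset.cons_erase hx).symm⟩
      have h2 := Multiset.erase_le_erase x h
      rwa [Multiset.erase_cons_head] at h2
    · left
      refine Multiset.le_iff_count.mpr (fun a => ?_)
      have hc := Multiset.le_iff_count.mp h a
      rw [Multiset.count_cons] at hc
      by_cases hax : a = x
      · subst hax
        simpa [Multiset.count_eq_zero_of_notMem hx] using Nat.zero_le _
      · simpa [hax] using hc
  · rintro (h | ⟨S', hS', rfl⟩)
    · exact h.trans (Multiset.le_cons_self _ _)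
    · exact Multiset.cons_le_cons _ hS'

-- element characterization of B's subset-sum fold
lemma mem_sums_foldl : ∀ (l : List Int) (acc : List Int) (s : Int),
    (s ∈ l.foldl (fun acc x => PySem.Set.union acc (acc.map (fun t => t + x))) acc) ↔
    ∃ t ∈ acc, ∃ S : Multiset Int, S ≤ (l : Multiset Int) ∧ s = t + S.sum := by
  intro l
  induction l with
  | nil =>
    intro acc s
    simp only [List.foldl_nil]
    constructor
    · intro h; exact ⟨s, h, 0, by simp, by simp⟩
    · rintro ⟨t, ht, S, hS, rfl⟩
      have : S = 0 := Multiset.le_zero.mp (by simpa using hS)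
      simp [this]
      exact ht
  | cons x l ih =>
    intro acc s
    simp only [List.foldl_cons]
    rw [ih]
    constructor
    · rintro ⟨t, ht, S, hS, rfl⟩
      rcases (PySem.Set.mem_union _ _ _).mp ht with ht' | ht'
      · exact ⟨t, ht', S, by
          rw [show ((x :: l : List Int) : Multiset Int) = x ::ₘ (l : Multiset Int) from rfl]
          exact hS.trans (Multiset.le_cons_self _ _), rfl⟩
      · obtain ⟨u, hu, rfl⟩ := List.mem_map.mp ht'
        refine ⟨u, hu, x ::ₘ S, ?_, by simp [Multiset.sum_cons]; ring⟩
        rw [show ((x :: l : List Int) : Multiset Int) = x ::ₘ (l : Multiset Int) from rfl]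
        exact Multiset.cons_le_cons _ hS
    · rintro ⟨t, ht, S, hS, rfl⟩
      rw [show ((x :: l : List Int) : Multiset Int) = x ::ₘ (l : Multiset Int) from rfl] at hS
      rcases le_cons_iff_aux.mp hS with hS' | ⟨S', hS', rfl⟩
      · exact ⟨t, (PySem.Set.mem_union _ _ _).mpr (Or.inl ht), S, hS', rfl⟩
      · refine ⟨t + x, (PySem.Set.mem_union _ _ _).mpr (Or.inr (List.mem_map.mpr ⟨t, ht, rfl⟩)), S', hS', ?_⟩
        simp [Multiset.sum_cons]; ring

lemma mem_sumsList {data : List Int} {s : Int} :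
    (s ∈ data.foldl (fun acc x => PySem.Set.union acc (acc.map (fun t => t + x))) (PySem.Set.ofList [0])) ↔
    ∃ S : Multiset Int, S ≤ (data : Multiset Int) ∧ s = S.sum := by
  rw [mem_sums_foldl]
  constructor
  · rintro ⟨t, ht, S, hS, rfl⟩
    have : t = 0 := by simpa [PySem.Set.ofList] using ht
    exact ⟨S, hS, by simp [this]⟩
  · rintro ⟨S, hS, rfl⟩
    exact ⟨0, by simp [PySem.Set.ofList], S, hS, by simp⟩

lemma coe_eraseIdx {data : List Int} {i : Nat} (h : i < data.length) :
    (data : Multiset Int) = data[i] ::ₘ (data.eraseIdx i : Multiset Int) := by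
  have hp : List.Perm (data[i] :: data.eraseIdx i) data := List.getElem_cons_eraseIdx_perm h
  exact (Multiset.coe_eq_coe.mpr hp).symm

lemma sum_eraseIdx {data : List Int} {i : Nat} (h : i < data.length) :
    (data.eraseIdx i).sum = data.sum - data[i] := by
  have hp : List.Perm (data[i] :: data.eraseIdx i) data := List.getElem_cons_eraseIdx_perm h
  have h2 := hp.sum_eq
  rw [List.sum_cons] at h2
  omega

-- A's result is the removal sum of some valid sub-multiset
lemma cargo_mem : ∀ (n : Nat) (data : List Int) (half : Int), data.length ≤ n →
    0 ≤ half → half < data.sum →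
    ∃ S : Multiset Int, S ≤ (data : Multiset Int) ∧ data.sum - S.sum ≤ half ∧
      cargo data half = S.sum := by
  intro n
  induction n with
  | zero =>
    intro data half hlen h0 hs
    have : data = [] := List.length_eq_zero_iff.mp (Nat.le_zero.mp hlen)
    subst this; simp at hs; omega
  | succ n ih =>
    intro data half hlen h0 hs
    have hne : data ≠ [] := by rintro rfl; simp at hs; omega
    rw [cargo_of_gt (not_le.mpr hs)]
    set L := (List.range data.length).attach.map
      (fun p : {x // x ∈ List.range data.length} =>
        data[p.1]'(List.mem_range.mp p.2) + cargo (data.eraseIdx p.1) half) with hL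
    have hLne : L ≠ [] := by
      simp [hL, List.map_eq_nil_iff, List.attach_eq_nil_iff, List.length_eq_zero_iff, hne]
    obtain ⟨m, hm⟩ : ∃ m, PySem.List.min? L (fun x => x) = some m := by
      cases hmin : PySem.List.min? L (fun x => x) with
      | none => exact absurd ((PySem.List.min?_eq_none_iff _ _).mp hmin) hLne
      | some m => exact ⟨m, rfl⟩
    rw [hm, Option.getD_some]
    have hmem := PySem.List.min?_mem hm
    rw [hL] at hmem
    obtain ⟨⟨i, hir⟩, _, hmv⟩ := List.mem_map.mp hmem
    have hi : i < data.length := List.mem_range.mp hir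
    by_cases hc : (data.eraseIdx i).sum ≤ half
    · refine ⟨{data[i]}, ?_, ?_, ?_⟩
      · simpa using List.getElem_mem hi
      · have := sum_eraseIdx hi; simp; omega
      · rw [← hmv, cargo_of_le hc]; simp
    · obtain ⟨S', hS'le, hS'q, hS'eq⟩ :=
        ih (data.eraseIdx i) half (by have := List.length_eraseIdx_of_lt hi; omega) h0 (not_le.mp hc)
      refine ⟨data[i] ::ₘ S', ?_, ?_, ?_⟩
      · rw [coe_eraseIdx hi]; exact Multiset.cons_le_cons _ hS'le
      · have := sum_eraseIdx hi; simp [Multiset.sum_cons]; omega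
      · rw [← hmv, hS'eq]; simp [Multiset.sum_cons]

-- A's result is a lower bound for every valid removal sum
lemma cargo_le : ∀ (n : Nat) (data : List Int) (half : Int), data.length ≤ n →
    half < data.sum →
    ∀ S : Multiset Int, S ≤ (data : Multiset Int) → data.sum - S.sum ≤ half →
      cargo data half ≤ S.sum := by
  intro n
  induction n with
  | zero =>
    intro data half hlen hs S hSle hSq
    have : data = [] := List.length_eq_zero_iff.mp (Nat.le_zero.mp hlen)
    subst this
    have : S = 0 := Multiset.le_zero.mp (by simpa using hSle)
    subst this; simp at hs hSq; omega
  | succ n ih =>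
    intro data half hlen hs S hSle hSq
    have hSne : S ≠ 0 := by
      rintro rfl; simp at hSq; omega
    -- pick x ∈ S: a nonpositive one if any, else any element (then all of S is positive)
    have hx : ∃ x ∈ S, x ≤ 0 ∨ ∀ y ∈ S, 0 < y := by
      by_cases hneg : ∃ x ∈ S, x ≤ 0
      · obtain ⟨x, hxS, hx0⟩ := hneg; exact ⟨x, hxS, Or.inl hx0⟩
      · rw [not_exists] at hneg
        simp only [not_and, not_le] at hneg
        obtain ⟨x, hxS⟩ := Multiset.exists_mem_of_ne_zero hSne
        exact ⟨x, hxS, Or.inr hneg⟩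
    obtain ⟨x, hxS, hxcase⟩ := hx
    have hxd : x ∈ data := by
      have := Multiset.mem_of_le hSle hxS; simpa using this
    obtain ⟨i, hi, hxi⟩ := List.mem_iff_getElem.mp hxd
    -- cargo data half ≤ data[i] + cargo (data.eraseIdx i) half
    rw [cargo_of_gt (not_le.mpr hs)]
    set L := (List.range data.length).attach.map
      (fun p : {x // x ∈ List.range data.length} =>
        data[p.1]'(List.mem_range.mp p.2) + cargo (data.eraseIdx p.1) half) with hL
    have hcand : data[i] + cargo (data.eraseIdx i) half ∈ L := by
      rw [hL]
      exact List.mem_map.mpr ⟨⟨i, List.mem_range.mpr hi⟩, List.mem_attach _ _, rfl⟩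
    obtain ⟨m, hm⟩ : ∃ m, PySem.List.min? L (fun x => x) = some m := by
      cases hmin : PySem.List.min? L (fun x => x) with
      | none =>
        rw [(PySem.List.min?_eq_none_iff _ _).mp hmin] at hcand
        exact absurd hcand (List.not_mem_nil)
      | some m => exact ⟨m, rfl⟩
    rw [hm, Option.getD_some]
    have hmle : m ≤ data[i] + cargo (data.eraseIdx i) half := PySem.List.min?_isMin hm _ hcand
    have hesum := sum_eraseIdx hi
    have hSsum : (S.erase x).sum = S.sum - x := by
      have := Multiset.cons_erase hxS
      have h2 : S.sum = x + (S.erase x).sum := by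
        conv_lhs => rw [← this]
        simp [Multiset.sum_cons]
      omega
    by_cases hc : (data.eraseIdx i).sum ≤ half
    · -- removal stops right after x; then x must be positive, and all of S is positive
      rw [cargo_of_le hc] at hmle
      have hxpos : 0 < x := by omega
      have hall : ∀ y ∈ S, 0 < y := by
        rcases hxcase with h | h
        · omega
        · exact h
      have hrest : 0 ≤ (S.erase x).sum :=
        Multiset.sum_nonneg (fun y hy => le_of_lt (hall y (Multiset.mem_of_mem_erase hy)))
      omega
    · -- recurse on data without x, with S minus x
      have hSle' : S.erase x ≤ (data.eraseIdx i : Multiset Int) := by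
        have h2 := Multiset.erase_le_erase x hSle
        rwa [coe_eraseIdx hi, hxi, Multiset.erase_cons_head] at h2
      have hq' : (data.eraseIdx i).sum - (S.erase x).sum ≤ half := by omega
      have := ih (data.eraseIdx i) half (by have := List.length_eraseIdx_of_lt hi; omega)
        (not_le.mp hc) (S.erase x) hSle' hq'
      omega

-- ===== VERDICT (by name: the statement is the Claim_ definition above) =====
theorem cargo_spec : Claim_equal_cargo := by
  intro data half _ hpre
  unfold Spec_cargo
  by_cases hs : data.sum ≤ half
  · rw [cargo_of_le hs]
    simp only [cargo_alt]
    rw [if_pos hs]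
  · have h0 : 0 ≤ half := by
      rcases hpre with h | h
      · exact absurd h hs
      · exact h
    have hs' : half < data.sum := not_le.mp hs
    simp only [cargo_alt]
    rw [if_neg hs]
    obtain ⟨S₀, hS₀le, hS₀q, hS₀eq⟩ := cargo_mem data.length data half le_rfl h0 hs'
    set F := (data.foldl (fun acc x => PySem.Set.union acc (acc.map (fun s => s + x)))
        (PySem.Set.ofList [0])).filter (fun s => decide (data.sum - s ≤ half)) with hF
    have hcin : cargo data half ∈ F := by
      rw [hF, List.mem_filter]
      refine ⟨mem_sumsList.mpr ⟨S₀, hS₀le, hS₀eq⟩, by rw [hS₀eq]; simpa using hS₀q⟩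
    obtain ⟨m, hm⟩ : ∃ m, PySem.List.min? F (fun x => x) = some m := by
      cases hmin : PySem.List.min? F (fun x => x) with
      | none =>
        rw [(PySem.List.min?_eq_none_iff _ _).mp hmin] at hcin
        exact absurd hcin (List.not_mem_nil)
      | some m => exact ⟨m, rfl⟩
    rw [hm, Option.getD_some]
    have hmF := PySem.List.min?_mem hm
    rw [hF, List.mem_filter] at hmF
    obtain ⟨S₁, hS₁le, hS₁eq⟩ := mem_sumsList.mp hmF.1
    have hmq : data.sum - m ≤ half := by simpa using hmF.2
    have h1 : cargo data half ≤ m := by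
      rw [hS₁eq]
      exact cargo_le data.length data half le_rfl hs' S₁ hS₁le (by omega)
    have h2 : m ≤ cargo data half := PySem.List.min?_isMin hm _ hcin
    omega
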